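-- pv_equiv track=rewrite | github.com/Mingkai2233/origin | PEA/main.py | rawhex_to_hex
-- ===== SOURCE A (Python) =====
-- def rawhex_to_hex(string):  # 将内存中的字节码转为十六进制数字,以字符串形式返回
--     list1 = list(string)
--     for i in range(len(list1)):
--         list1[i] = hex(list1[i])
--     result = ''
--     for i in range(1, len(list1) + 1):
--         tmp = list1[-i][2:]
--         if int(tmp, 16) < 16:
--             tmp = '0' + tmp
--         result += tmp
--     return '0x' + result
-- ===== SOURCE B (Python) =====
-- def rawhex_to_hex(string):  # accumulate one big integer; a single final zero-padded format
--     n = 0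
--     shift = 0  # total hex-digit width accumulated so far
--     for x in string:
--         n += x << (4 * shift)
--         shift += max(2, len('%x' % x))
--     if shift == 0:
--         return '0x'
--     return '0x' + format(n, '0%dx' % shift)
-- ===== Notes on version B (the rewrite author's own statement) =====
-- stated objective: alternative
-- what changed: A converts each byte to a hex() string and concatenates the chunks in a reversed-index loop with parse-back padding; B never builds per-byte strings: it folds the list into a single big integer (shifting each element into place by the running hex-digit width) and formats that one number once, zero-padded to the accumulated width.
-- outside the precondition, e.g. on rawhex_to_hex([-1]): A raises ValueError, B returns '0x-1'
import Mathlib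
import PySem

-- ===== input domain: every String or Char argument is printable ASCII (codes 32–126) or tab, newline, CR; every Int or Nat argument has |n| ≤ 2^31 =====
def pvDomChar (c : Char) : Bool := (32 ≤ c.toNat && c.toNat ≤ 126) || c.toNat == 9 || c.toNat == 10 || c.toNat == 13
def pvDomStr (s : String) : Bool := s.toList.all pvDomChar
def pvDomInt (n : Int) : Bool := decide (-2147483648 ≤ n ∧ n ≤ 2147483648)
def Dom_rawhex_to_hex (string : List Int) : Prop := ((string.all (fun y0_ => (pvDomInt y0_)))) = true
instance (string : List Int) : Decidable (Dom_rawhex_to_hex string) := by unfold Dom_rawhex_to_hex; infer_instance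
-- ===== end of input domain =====

-- B drops A's per-byte hex-string chunks entirely: it folds the list into one big integer
-- (shifting each element by the running hex-digit width) and formats that number once (alternative).

-- ===== PORT A =====
-- lowercase hex digits of n, most significant first (the digit string Python's hex()/format produce)
def hexDigits (n : Nat) : List Char :=
  if n < 16 then [Nat.digitChar n]
  else hexDigits (n / 16) ++ [Nat.digitChar (n % 16)]
decreasing_by exact Nat.div_lt_self (by omega) (by omega)

-- hex(n): exact, including the sign placement for negative n
def pyHex (n : Int) : String :=
  if n < 0 then "-0x" ++ String.ofList (hexDigits (-n).toNat)
  else "0x" ++ String.ofList (hexDigits n.toNat)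

-- int(s, 16): exact on nonempty lowercase hex-digit strings — the only strings A feeds it inside Pre_
def parseHex (l : List Char) : Nat :=
  l.foldl (fun a c => 16 * a + (if c.toNat ≤ 57 then c.toNat - 48 else c.toNat - 87)) 0

def rawhex_to_hex (string : List Int) : String :=
  let list1 := string.map pyHex
  let result := (PySem.List.pyRange 1 ((list1.length : Int) + 1) 1).foldl
    (fun result i =>
      let tmp := ((PySem.List.pyGet? list1 (-i)).getD "").toList.drop 2
      let tmp := if parseHex tmp < 16 then '0' :: tmp else tmp
      result ++ String.ofList tmp) ""
  "0x" ++ result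

-- ===== PORT B =====
-- len('%x' % x): exact (a negative number prints '-' plus the digits of |x|)
def pyHexLen (x : Int) : Nat :=
  if x < 0 then 1 + (hexDigits (-x).toNat).length else (hexDigits x.toNat).length

-- format(n, '0{w}x'): exact (the '-' of a negative number counts towards the width)
def fmtPadHex (w : Nat) (n : Int) : List Char :=
  if n < 0 then
    '-' :: (List.replicate (w - 1 - (hexDigits (-n).toNat).length) '0' ++ hexDigits (-n).toNat)
  else
    List.replicate (w - (hexDigits n.toNat).length) '0' ++ hexDigits n.toNat

def rawhex_to_hex_alt (string : List Int) : String :=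
  let p := string.foldl
    (fun (p : Int × Nat) x => (p.1 + x * 2 ^ (4 * p.2), p.2 + max 2 (pyHexLen x))) (0, 0)
  if p.2 = 0 then "0x" else "0x" ++ String.ofList (fmtPadHex p.2 p.1)

-- ===== PRECONDITION & SPEC =====
-- Pre_ excludes lists containing a negative integer: there A raises ValueError
-- (int('x…', 16) on the tail of hex(negative)), so A returns no value.
def Pre_rawhex_to_hex (string : List Int) : Prop := ∀ x ∈ string, 0 ≤ x
instance (string : List Int) : Decidable (Pre_rawhex_to_hex string) := by
  unfold Pre_rawhex_to_hex; infer_instance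

def pvWitness_rawhex_to_hex : List Int := [0, 5, 16, 255]

def Spec_rawhex_to_hex (string : List Int) (out : String) : Prop := out = rawhex_to_hex_alt string
instance (string : List Int) (out : String) : Decidable (Spec_rawhex_to_hex string out) := by
  unfold Spec_rawhex_to_hex; infer_instance

-- ===== CLAIM (what is proved, stated in full; the proofs are below) =====
def Claim_equal_rawhex_to_hex : Prop := ∀ (string : List Int), Dom_rawhex_to_hex string → Pre_rawhex_to_hex string → Spec_rawhex_to_hex string (rawhex_to_hex string)

-- ===== LEMMAS AND PROOFS =====

-- the chunk A appends for one element, extracted for the loop invariant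
def chunkA (x : Int) : List Char :=
  let tmp := (pyHex x).toList.drop 2
  if parseHex tmp < 16 then '0' :: tmp else tmp

-- hex digits of n written in EXACTLY w positions (n < 16^w), most significant first
def hexFix (w : Nat) (n : Nat) : List Char :=
  match w with
  | 0 => []
  | w + 1 => hexFix w (n / 16) ++ [Nat.digitChar (n % 16)]

-- value and total width of B's accumulator, over Nats
def wN (x : Int) : Nat := max 2 (hexDigits x.toNat).length
def swN : List Int → Nat
  | [] => 0
  | x :: t => wN x + swN t
def nvN : List Int → Nat
  | [] => 0
  | x :: t => x.toNat + 16 ^ wN x * nvN t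

theorem hexDigits_ne_nil (n : Nat) : hexDigits n ≠ [] := by
  unfold hexDigits; split <;> simp

theorem hexDigits_of_lt (n : Nat) (h : n < 16) : hexDigits n = [Nat.digitChar n] := by
  unfold hexDigits; simp [h]

theorem parseHex_hexDigits (n : Nat) : parseHex (hexDigits n) = n := by
  induction n using Nat.strong_induction_on with
  | _ n ih =>
    unfold hexDigits
    split
    · rename_i h
      interval_cases n <;> decide
    · rename_i h
      have hlt : n / 16 < n := Nat.div_lt_self (by omega) (by omega)
      have hdig : (if (Nat.digitChar (n % 16)).toNat ≤ 57 then (Nat.digitChar (n % 16)).toNat - 48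
          else (Nat.digitChar (n % 16)).toNat - 87) = n % 16 := by
        have hmod : n % 16 < 16 := Nat.mod_lt _ (by omega)
        interval_cases h : (n % 16) <;> decide
      simp only [parseHex, List.foldl_append, List.foldl] at *
      rw [ih _ hlt, hdig]
      omega

theorem two_le_length_hexDigits (n : Nat) (h : ¬ n < 16) : 2 ≤ (hexDigits n).length := by
  rw [hexDigits]
  simp only [h, if_false, List.length_append, List.length_cons, List.length_nil]
  have h1 : 1 ≤ (hexDigits (n / 16)).length :=
    List.length_pos_of_ne_nil (hexDigits_ne_nil (n / 16))
  omega

theorem lt_pow_length_hexDigits (n : Nat) : n < 16 ^ (hexDigits n).length := by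
  induction n using Nat.strong_induction_on with
  | _ n ih =>
    unfold hexDigits
    split
    · rename_i h; simpa using h
    · rename_i h
      have hlt : n / 16 < n := Nat.div_lt_self (by omega) (by omega)
      have := ih _ hlt
      simp only [List.length_append, List.length_cons, List.length_nil, pow_succ]
      have hn : n = 16 * (n / 16) + n % 16 := (Nat.div_add_mod n 16).symm ▸ by omega
      have hmod : n % 16 < 16 := Nat.mod_lt _ (by omega)
      calc n = 16 * (n / 16) + n % 16 := by omega
        _ < 16 * (n / 16) + 16 := by omega
        _ = 16 * (n / 16 + 1) := by ring
        _ ≤ 16 * 16 ^ (hexDigits (n / 16)).length := by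
              have : n / 16 + 1 ≤ 16 ^ (hexDigits (n / 16)).length := this
              exact Nat.mul_le_mul_left 16 this
        _ = 16 ^ (hexDigits (n / 16)).length * 16 := by ring

theorem hexFix_zero (w : Nat) : hexFix w 0 = List.replicate w '0' := by
  induction w with
  | zero => rfl
  | succ w ih =>
    show hexFix w (0 / 16) ++ [Nat.digitChar (0 % 16)] = _
    rw [Nat.zero_div, ih]
    simp [List.replicate_succ' , Nat.digitChar]

-- format-to-width agrees with the exact-width digit writer when n fits and w ≥ 1
theorem pad_eq_hexFix (w n : Nat) (hw : 1 ≤ w) (hn : n < 16 ^ w) :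
    List.replicate (w - (hexDigits n).length) '0' ++ hexDigits n = hexFix w n := by
  induction w generalizing n with
  | zero => omega
  | succ w ih =>
    by_cases h : n < 16
    · rw [hexDigits_of_lt n h]
      show _ = hexFix w (n / 16) ++ [Nat.digitChar (n % 16)]
      rw [Nat.div_eq_of_lt h, Nat.mod_eq_of_lt h, hexFix_zero]
      simp
    · have hw' : 1 ≤ w := by
        by_contra hc
        have : w = 0 := by omega
        subst this; simp at hn; omega
      have hdiv : n / 16 < 16 ^ w :=
        (Nat.div_lt_iff_lt_mul (by omega)).2 (by rw [pow_succ] at hn; omega)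
      have ihd := ih (n / 16) hw' hdiv
      conv_lhs => rw [hexDigits, if_neg h]
      show _ = hexFix w (n / 16) ++ [Nat.digitChar (n % 16)]
      rw [← ihd]
      have hlen : (hexDigits (n / 16) ++ [Nat.digitChar (n % 16)]).length
          = (hexDigits (n / 16)).length + 1 := by simp
      rw [hlen]
      have : w + 1 - ((hexDigits (n / 16)).length + 1) = w - (hexDigits (n / 16)).length := by
        omega
      rw [this, List.append_assoc]

-- splitting a number into a low w-digit part and a high part splits its digit string
theorem hexFix_split (w s a b : Nat) (ha : a < 16 ^ w) :
    hexFix (w + s) (a + 16 ^ w * b) = hexFix s b ++ hexFix w a := by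
  induction w generalizing a with
  | zero =>
    have : a = 0 := by simpa using ha
    subst this; simp [hexFix]
  | succ w ih =>
    have hshow : w + 1 + s = (w + s) + 1 := by omega
    rw [hshow]
    show hexFix (w + s) ((a + 16 ^ (w + 1) * b) / 16) ++
        [Nat.digitChar ((a + 16 ^ (w + 1) * b) % 16)] = _
    have hdv : (a + 16 ^ (w + 1) * b) / 16 = a / 16 + 16 ^ w * b := by
      rw [pow_succ]
      have : 16 ^ w * 16 * b = 16 * (16 ^ w * b) := by ring
      rw [this, Nat.add_mul_div_left _ _ (by omega)]
    have hmd : (a + 16 ^ (w + 1) * b) % 16 = a % 16 := by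
      rw [pow_succ]
      have : 16 ^ w * 16 * b = 16 ^ w * b * 16 := by ring
      rw [this, Nat.add_mul_mod_self_right]
    have hdiv : a / 16 < 16 ^ w :=
      (Nat.div_lt_iff_lt_mul (by omega)).2 (by rw [pow_succ] at ha; omega)
    rw [hdv, hmd, ih _ hdiv]
    show _ = hexFix s b ++ (hexFix w (a / 16) ++ [Nat.digitChar (a % 16)])
    rw [List.append_assoc]

theorem nvN_lt (l : List Int) : nvN l < 16 ^ swN l := by
  induction l with
  | nil => simp [nvN, swN]
  | cons x t ih =>
    show x.toNat + 16 ^ wN x * nvN t < 16 ^ (wN x + swN t)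
    have hx : x.toNat < 16 ^ wN x := by
      have h1 := lt_pow_length_hexDigits x.toNat
      have h2 : (hexDigits x.toNat).length ≤ wN x := le_max_right _ _
      exact lt_of_lt_of_le h1 (Nat.pow_le_pow_right (by omega) h2)
    calc x.toNat + 16 ^ wN x * nvN t < 16 ^ wN x * (nvN t + 1) := by
          have : 16 ^ wN x * (nvN t + 1) = 16 ^ wN x * nvN t + 16 ^ wN x := by ring
          omega
      _ ≤ 16 ^ wN x * 16 ^ swN t := Nat.mul_le_mul_left _ (by omega)
      _ = 16 ^ (wN x + swN t) := (pow_add 16 _ _).symm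

-- A's chunk for a nonnegative element is exactly its wN-wide digit string
theorem chunkA_eq_hexFix (x : Int) (hx : 0 ≤ x) : chunkA x = hexFix (wN x) x.toNat := by
  have hx' : ¬ x < 0 := by omega
  unfold chunkA pyHex
  simp only [hx', if_false]
  have htl : ("0x" ++ String.ofList (hexDigits x.toNat)).toList
      = '0' :: 'x' :: hexDigits x.toNat := by simp
  rw [htl]
  simp only [List.drop_succ_cons, List.drop_zero, parseHex_hexDigits]
  have hfit : x.toNat < 16 ^ wN x := by
    have h1 := lt_pow_length_hexDigits x.toNat
    have h2 : (hexDigits x.toNat).length ≤ wN x := le_max_right _ _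
    exact lt_of_lt_of_le h1 (Nat.pow_le_pow_right (by omega) h2)
  have hpad := pad_eq_hexFix (wN x) x.toNat (by unfold wN; omega) hfit
  by_cases h : x.toNat < 16
  · rw [hexDigits_of_lt _ h] at hpad ⊢
    simp only [h, if_true]
    rw [← hpad]
    have : wN x = 2 := by
      unfold wN; rw [hexDigits_of_lt _ h]; simp
    rw [this] at hpad ⊢
    simp
  · simp only [h, if_false]
    rw [← hpad]
    have : wN x = (hexDigits x.toNat).length := by
      unfold wN
      have := two_le_length_hexDigits x.toNat h
      omega
    rw [this]
    simp

-- A's loop (the reversed-index concatenation) in closed form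
theorem loopA (l : List Int) (acc : String) :
    (PySem.List.pyRange 1 ((l.length : Int) + 1) 1).foldl
      (fun result i =>
        let tmp := ((PySem.List.pyGet? (l.map pyHex) (-i)).getD "").toList.drop 2
        let tmp := if parseHex tmp < 16 then '0' :: tmp else tmp
        result ++ String.ofList tmp) acc
    = acc ++ String.ofList (l.reverse.map chunkA).flatten := by
  induction l generalizing acc with
  | nil =>
    rw [PySem.List.pyRange_one_eq_nil (by simp)]
    simp
  | cons x t ih =>
    have hlen : (((x :: t).length : Int) + 1) = ((t.length : Int) + 1) + 1 := by
      push_cast [List.length_cons]; ring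
    rw [hlen, PySem.List.pyRange_one_succ_right (by omega), List.foldl_append]
    have hcongr : (PySem.List.pyRange 1 ((t.length : Int) + 1) 1).foldl
        (fun result i =>
          let tmp := ((PySem.List.pyGet? ((x :: t).map pyHex) (-i)).getD "").toList.drop 2
          let tmp := if parseHex tmp < 16 then '0' :: tmp else tmp
          result ++ String.ofList tmp) acc
        = (PySem.List.pyRange 1 ((t.length : Int) + 1) 1).foldl
        (fun result i =>
          let tmp := ((PySem.List.pyGet? (t.map pyHex) (-i)).getD "").toList.drop 2
          let tmp := if parseHex tmp < 16 then '0' :: tmp else tmp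
          result ++ String.ofList tmp) acc := by
      apply PySem.List.foldl_congr_mem
      intro a i hi
      have hmem := (PySem.List.mem_pyRange_one).1 hi
      have hk : i = (i.toNat : Int) := by omega
      have hk1 : 0 < i.toNat := by omega
      have hkt : i.toNat ≤ t.length := by omega
      have hget : PySem.List.pyGet? ((x :: t).map pyHex) (-i)
          = PySem.List.pyGet? (t.map pyHex) (-i) := by
        rw [hk,
          PySem.List.pyGet?_neg_natCast ((x :: t).map pyHex) i.toNat hk1 (by simp; omega),
          PySem.List.pyGet?_neg_natCast (t.map pyHex) i.toNat hk1 (by simp; omega)]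
        simp only [List.length_map, List.length_cons]
        have hs : t.length + 1 - i.toNat = (t.length - i.toNat) + 1 := by omega
        rw [hs]
        simp
      rw [hget]
    rw [hcongr, ih]
    have hlast : PySem.List.pyGet? ((x :: t).map pyHex) (-((t.length : Int) + 1))
        = some (pyHex x) := by
      have hc : ((t.length : Int) + 1) = ((t.length + 1 : Nat) : Int) := by push_cast; ring
      rw [hc, PySem.List.pyGet?_neg_natCast ((x :: t).map pyHex) (t.length + 1)
        (by omega) (by simp)]
      simp
    simp only [List.foldl_cons, List.foldl_nil, hlast, Option.getD_some]
    rw [List.reverse_cons, List.map_append, List.flatten_append]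
    simp [chunkA, String.append_assoc]

-- B's fold in closed form (nonnegative elements)
theorem loopB (l : List Int) (n0 : Int) (s0 : Nat) (hpre : ∀ x ∈ l, 0 ≤ x) :
    l.foldl (fun (p : Int × Nat) x =>
        (p.1 + x * 2 ^ (4 * p.2), p.2 + max 2 (pyHexLen x))) (n0, s0)
    = (n0 + 16 ^ s0 * (nvN l : Int), s0 + swN l) := by
  induction l generalizing n0 s0 with
  | nil => simp [nvN, swN]
  | cons x t ih =>
    have hx : 0 ≤ x := hpre x (by simp)
    have hx' : ¬ x < 0 := by omega
    simp only [List.foldl_cons]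
    have hw : max 2 (pyHexLen x) = wN x := by
      unfold pyHexLen wN; rw [if_neg hx']
    rw [ih _ _ (fun y hy => hpre y (by simp [hy])), hw]
    simp only [Prod.mk.injEq]
    refine ⟨?_, ?_⟩
    · show n0 + x * 2 ^ (4 * s0) + 16 ^ (s0 + wN x) * (nvN t : Int)
          = n0 + 16 ^ s0 * ((((x.toNat + 16 ^ wN x * nvN t : Nat)) : Int))
      have h2 : (2 : Int) ^ (4 * s0) = 16 ^ s0 := by
        rw [show (16 : Int) = 2 ^ 4 by norm_num, ← pow_mul, Nat.mul_comm]
      rw [h2]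
      push_cast [Int.toNat_of_nonneg hx]
      ring
    · show s0 + wN x + swN t = s0 + (wN x + swN t)
      omega

-- A's concatenated chunks are exactly the digit string of B's big number
theorem flatten_chunks_eq (l : List Int) (hpre : ∀ x ∈ l, 0 ≤ x) :
    (l.reverse.map chunkA).flatten = hexFix (swN l) (nvN l) := by
  induction l with
  | nil => simp [swN, nvN, hexFix]
  | cons x t ih =>
    have hx : 0 ≤ x := hpre x (by simp)
    rw [List.reverse_cons, List.map_append, List.flatten_append,
      ih (fun y hy => hpre y (by simp [hy]))]
    have hfit : x.toNat < 16 ^ wN x := by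
      have h1 := lt_pow_length_hexDigits x.toNat
      have h2 : (hexDigits x.toNat).length ≤ wN x := le_max_right _ _
      exact lt_of_lt_of_le h1 (Nat.pow_le_pow_right (by omega) h2)
    show hexFix (swN t) (nvN t) ++ (chunkA x ++ []) = hexFix (wN x + swN t) (x.toNat + 16 ^ wN x * nvN t)
    rw [hexFix_split _ _ _ _ hfit, chunkA_eq_hexFix x hx]
    simp

-- ===== VERDICT (by name: the statement is the Claim_ definition above) =====
theorem rawhex_to_hex_spec : Claim_equal_rawhex_to_hex := by
  intro string _ hpre
  unfold Spec_rawhex_to_hex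
  simp only [rawhex_to_hex, rawhex_to_hex_alt, List.length_map]
  rw [loopA, loopB string 0 0 hpre]
  simp only [pow_zero, one_mul, zero_add]
  cases string with
  | nil => simp [swN]
  | cons x t =>
    have hsw : swN (x :: t) ≠ 0 := by show wN x + swN t ≠ 0; unfold wN; omega
    rw [if_neg hsw]
    have hfmt : fmtPadHex (swN (x :: t)) ((nvN (x :: t) : Int))
        = hexFix (swN (x :: t)) (nvN (x :: t)) := by
      unfold fmtPadHex
      rw [if_neg (by omega)]
      simp only [Int.toNat_natCast]
      exact pad_eq_hexFix _ _
        (by show 1 ≤ swN (x :: t); show 1 ≤ wN x + swN t; unfold wN; omega) (nvN_lt _)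
    rw [hfmt, flatten_chunks_eq _ hpre]
    simp
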